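-- pv_equiv track=rewrite | github.com/rolewj/steganography | lab5/rs_analysis.py | create_masks_static
-- ===== SOURCE A (Python) =====
-- def create_masks_static(m: int, n: int) -> tuple[list[int], list[int]]:
--     mask_pos = []
--     mask_neg = []
--     for i in range(n):
--         for j in range(m):
--             if ((j % 2 == 0 and i % 2 == 0) or (j % 2 == 1 and i % 2 == 1)):
--                 mask_pos.append(1)
--                 mask_neg.append(0)
--             else:
--                 mask_pos.append(0)
--                 mask_neg.append(1)
--     return mask_pos, mask_neg
-- ===== SOURCE B (Python) =====
-- def create_masks_static(m: int, n: int) -> tuple[list[int], list[int]]: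
--     mask_pos = []
--     mask_neg = []
--     reps = (m + 1) // 2
--     for i in range(n):
--         pos_row = (([1, 0] if i % 2 == 0 else [0, 1]) * reps)[:m]
--         mask_pos.extend(pos_row)
--         mask_neg.extend(1 - x for x in pos_row)
--     return mask_pos, mask_neg
-- ===== Notes on version B (the rewrite author's own statement) =====
-- stated objective: idiomatic
-- what changed: The per-element parity branch in the inner loop is replaced by a row-level construction: each row is a [1,0]/[0,1] pattern tiled (m+1)//2 times and truncated to m, with the negative mask derived by complementing the positive row.
import Mathlib
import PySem

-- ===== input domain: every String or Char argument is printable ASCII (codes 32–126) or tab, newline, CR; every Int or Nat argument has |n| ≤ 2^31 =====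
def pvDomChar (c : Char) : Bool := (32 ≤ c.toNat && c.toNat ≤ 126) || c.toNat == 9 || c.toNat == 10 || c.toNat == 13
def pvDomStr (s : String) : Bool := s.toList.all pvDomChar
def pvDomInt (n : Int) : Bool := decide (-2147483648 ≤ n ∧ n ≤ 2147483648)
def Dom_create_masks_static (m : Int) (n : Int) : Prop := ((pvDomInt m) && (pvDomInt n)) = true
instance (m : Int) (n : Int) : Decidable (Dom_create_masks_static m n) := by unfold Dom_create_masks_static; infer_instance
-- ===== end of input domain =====

-- B replaces the per-element parity branch of the inner loop by building each row
-- as a tiled [1,0]/[0,1] pattern truncated to m, complementing it for the negative mask (idiomatic; same asymptotic cost).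

-- ===== PORT A =====
def create_masks_static (m : Int) (n : Int) : List Int × List Int :=
  (PySem.List.pyRange 0 n 1).foldl (fun acc i =>
    (PySem.List.pyRange 0 m 1).foldl (fun (acc2 : List Int × List Int) j =>
      if (PySem.Int.mod j 2 == 0 && PySem.Int.mod i 2 == 0)
         || (PySem.Int.mod j 2 == 1 && PySem.Int.mod i 2 == 1) then
        (acc2.1 ++ [1], acc2.2 ++ [0])
      else
        (acc2.1 ++ [0], acc2.2 ++ [1])) acc) ([], [])

-- ===== PORT B =====
def create_masks_static_alt (m : Int) (n : Int) : List Int × List Int :=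
  let reps := PySem.Int.floordiv (m + 1) 2
  (PySem.List.pyRange 0 n 1).foldl (fun acc i =>
    let pos_row := PySem.List.slice
      (PySem.List.pyRepeat (if PySem.Int.mod i 2 == 0 then [1, 0] else [0, 1]) reps)
      none (some m)
    (acc.1 ++ pos_row, acc.2 ++ pos_row.map (fun x => 1 - x))) ([], [])

-- ===== PRECONDITION & SPEC =====
def Spec_create_masks_static (m : Int) (n : Int) (out : List Int × List Int) : Prop := out = create_masks_static_alt m n
instance (m : Int) (n : Int) (out : List Int × List Int) : Decidable (Spec_create_masks_static m n out) := by unfold Spec_create_masks_static; infer_instance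

-- ===== CLAIM (what is proved, stated in full; the proofs are below) =====
def Claim_equal_create_masks_static : Prop := ∀ (m : Int) (n : Int), Dom_create_masks_static m n → Spec_create_masks_static m n (create_masks_static m n)

-- ===== LEMMAS AND PROOFS =====

-- A's inner loop over range(m), generic in the branch condition, as an append of two mapped ranges.
theorem pv_innerA (c : Int → Bool) (M : Nat) (p q : List Int) :
    ((List.range M).map (fun (k : Nat) => (k : Int))).foldl
      (fun (acc2 : List Int × List Int) j =>
        if c j then (acc2.1 ++ [1], acc2.2 ++ [0]) else (acc2.1 ++ [0], acc2.2 ++ [1])) (p, q)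
    = (p ++ (List.range M).map (fun (k : Nat) => if c (k : Int) then (1 : Int) else 0),
       q ++ (List.range M).map (fun (k : Nat) => if c (k : Int) then (0 : Int) else 1)) := by
  induction M with
  | zero => simp only [List.range_zero, List.map_nil, List.foldl_nil, List.append_nil]
  | succ M ih =>
    rw [List.range_succ]
    simp only [List.map_append, List.foldl_append, ih, List.map_cons, List.map_nil,
      List.foldl_cons, List.foldl_nil]
    by_cases h : c (M : Int) <;> simp [h, List.append_assoc]

-- element j of the tiled pattern [a,b]*K
theorem pv_tile_getElem? (a b : Int) : ∀ (K j : Nat), j < 2 * K →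
    ((List.replicate K [a, b]).flatten)[j]? = some (if j % 2 = 0 then a else b) := by
  intro K
  induction K with
  | zero => intro j h; omega
  | succ K ih =>
    intro j h
    rw [List.replicate_succ]
    match j with
    | 0 => simp
    | 1 => simp
    | (j' + 2) =>
      have h2 : j' < 2 * K := by omega
      have := ih j' h2
      simp only [List.flatten_cons, List.cons_append, List.nil_append,
        List.getElem?_cons_succ]
      rw [this]
      congr 1
      have : (j' + 2) % 2 = j' % 2 := by omega
      rw [this]

-- truncating the tiled pattern gives the mapped-range row
theorem pv_take_tile (a b : Int) (K M : Nat) (h : M ≤ 2 * K) :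
    List.take M ((List.replicate K [a, b]).flatten)
    = (List.range M).map (fun k => if k % 2 = 0 then a else b) := by
  apply List.ext_getElem?
  intro j
  by_cases hj : j < M
  · rw [List.getElem?_take]
    simp only [hj, if_pos]
    rw [pv_tile_getElem? a b K j (by omega)]
    rw [List.getElem?_map, List.getElem?_range hj]
    rfl
  · rw [List.getElem?_take]
    simp only [hj, if_false]
    symm
    apply List.getElem?_eq_none
    simpa using Nat.le_of_not_lt hj

-- B's row expression equals the mapped-range row
theorem pv_rowB (a b m : Int) :
    PySem.List.slice (PySem.List.pyRepeat [a, b] (PySem.Int.floordiv (m + 1) 2)) none (some m)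
    = (List.range m.toNat).map (fun k => if k % 2 = 0 then a else b) := by
  by_cases hm : 0 ≤ m
  · rw [PySem.List.slice_to _ hm]
    show List.take m.toNat ((List.replicate (PySem.Int.floordiv (m + 1) 2).toNat [a, b]).flatten) = _
    apply pv_take_tile
    have h1 := PySem.Int.floordiv_mul_add_mod (m + 1) 2
    have h2 := PySem.Int.mod_nonneg (m + 1) (b := 2) (by omega)
    have h3 := PySem.Int.mod_lt (m + 1) (b := 2) (by omega)
    omega
  · have hrep : (PySem.Int.floordiv (m + 1) 2).toNat = 0 := by
      have h1 := PySem.Int.floordiv_mul_add_mod (m + 1) 2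
      have h2 := PySem.Int.mod_nonneg (m + 1) (b := 2) (by omega)
      have h3 := PySem.Int.mod_lt (m + 1) (b := 2) (by omega)
      omega
    have hm0 : m.toNat = 0 := by omega
    show PySem.List.slice ((List.replicate (PySem.Int.floordiv (m + 1) 2).toNat [a, b]).flatten) none (some m) = _
    rw [hrep, hm0]
    simp [PySem.List.slice]

-- the complement of a 0/1 row
theorem pv_row_compl (a b : Int) (M : Nat) :
    ((List.range M).map (fun k => if k % 2 = 0 then a else b)).map (fun x => 1 - x)
    = (List.range M).map (fun k => if k % 2 = 0 then 1 - a else 1 - b) := by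
  rw [List.map_map]
  apply List.map_congr_left
  intro k _
  by_cases h : k % 2 = 0 <;> simp [h]

-- A's branch condition at j = ↑k, by parity of i
theorem pv_condA (i : Int) (k : Nat) (a b : Int) (hi : PySem.Int.mod i 2 = 0 ∨ PySem.Int.mod i 2 = 1) :
    (if (PySem.Int.mod (k : Int) 2 == 0 && PySem.Int.mod i 2 == 0)
        || (PySem.Int.mod (k : Int) 2 == 1 && PySem.Int.mod i 2 == 1) then a else b)
    = (if PySem.Int.mod i 2 = 0 then (if k % 2 = 0 then a else b)
       else (if k % 2 = 0 then b else a)) := by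
  have hk : PySem.Int.mod (k : Int) 2 = ((k % 2 : Nat) : Int) := by
    exact_mod_cast PySem.Int.mod_natCast k 2
  have hk2 : k % 2 = 0 ∨ k % 2 = 1 := by omega
  rcases hi with hi | hi <;> rcases hk2 with hk2 | hk2 <;>
    rw [hk, hk2, hi] <;> simp

-- the two outer fold bodies are the same function
theorem pv_body_eq (m : Int) :
    (fun (acc : List Int × List Int) (i : Int) =>
      (PySem.List.pyRange 0 m 1).foldl (fun (acc2 : List Int × List Int) j =>
        if (PySem.Int.mod j 2 == 0 && PySem.Int.mod i 2 == 0)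
           || (PySem.Int.mod j 2 == 1 && PySem.Int.mod i 2 == 1) then
          (acc2.1 ++ [1], acc2.2 ++ [0])
        else
          (acc2.1 ++ [0], acc2.2 ++ [1])) acc)
    = (fun (acc : List Int × List Int) (i : Int) =>
      let pos_row := PySem.List.slice
        (PySem.List.pyRepeat (if PySem.Int.mod i 2 == 0 then [1, 0] else [0, 1])
          (PySem.Int.floordiv (m + 1) 2)) none (some m)
      (acc.1 ++ pos_row, acc.2 ++ pos_row.map (fun x => 1 - x))) := by
  funext acc i
  obtain ⟨p, q⟩ := acc
  have h2 := PySem.Int.mod_nonneg i (b := 2) (by omega)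
  have h3 := PySem.Int.mod_lt i (b := 2) (by omega)
  have hi01 : PySem.Int.mod i 2 = 0 ∨ PySem.Int.mod i 2 = 1 := by omega
  rw [PySem.List.pyRange_zero, pv_innerA]
  simp only [Prod.mk.injEq]
  rcases hi01 with hi | hi
  · have e1 := List.map_congr_left (l := List.range m.toNat)
      (fun k _ => pv_condA i k (1 : Int) 0 (Or.inl hi))
    have e2 := List.map_congr_left (l := List.range m.toNat)
      (fun k _ => pv_condA i k (0 : Int) 1 (Or.inl hi))
    rw [e1, e2]
    have hib : (PySem.Int.mod i 2 == 0) = true := by rw [hi]; rfl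
    rw [hib]
    simp only [if_pos, hi]
    rw [pv_rowB 1 0 m, pv_row_compl]
    norm_num
  · have e1 := List.map_congr_left (l := List.range m.toNat)
      (fun k _ => pv_condA i k (1 : Int) 0 (Or.inr hi))
    have e2 := List.map_congr_left (l := List.range m.toNat)
      (fun k _ => pv_condA i k (0 : Int) 1 (Or.inr hi))
    rw [e1, e2]
    have hib : (PySem.Int.mod i 2 == 0) = false := by rw [hi]; rfl
    rw [hib]
    have hine : ¬ (PySem.Int.mod i 2 = 0) := by omega
    simp only [Bool.false_eq_true, if_false, hine]
    rw [pv_rowB 0 1 m, pv_row_compl]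
    norm_num

-- ===== VERDICT (by name: the statement is the Claim_ definition above) =====
theorem create_masks_static_spec : Claim_equal_create_masks_static := by
  intro m n _
  show create_masks_static m n = create_masks_static_alt m n
  unfold create_masks_static create_masks_static_alt
  rw [pv_body_eq m]
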